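-- pv_equiv track=rewrite | github.com/Chaudhary-AI/Gambler_Pinata_AI | scripts/bet_optimizer.py | optimize_bet
-- ===== SOURCE A (Python) =====
-- def optimize_bet(history):
--     if not history:
--         return "hold"
--
--     wins = sum(1 for r in history if r == "win")
--     losses = sum(1 for r in history if r == "lose")
--
--     if wins > losses:
--         return "increase"
--     elif losses > wins:
--         return "decrease"
--     return "hold"
-- ===== SOURCE B (Python) =====
-- def optimize_bet(history):
--     balance = 0
--     for r in history:
--         if r == "win":
--             balance += 1
--         elif r == "lose":
--             balance -= 1
--     if balance > 0:
--         return "increase"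
--     if balance < 0:
--         return "decrease"
--     return "hold"
-- ===== Notes on version B (the rewrite author's own statement) =====
-- stated objective: simpler
-- what changed: Replaces two counting comprehension passes (wins, losses) plus an explicit empty-list guard with a single pass maintaining one signed balance (+1 win, -1 lose) and a sign test at the end.
import Mathlib
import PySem

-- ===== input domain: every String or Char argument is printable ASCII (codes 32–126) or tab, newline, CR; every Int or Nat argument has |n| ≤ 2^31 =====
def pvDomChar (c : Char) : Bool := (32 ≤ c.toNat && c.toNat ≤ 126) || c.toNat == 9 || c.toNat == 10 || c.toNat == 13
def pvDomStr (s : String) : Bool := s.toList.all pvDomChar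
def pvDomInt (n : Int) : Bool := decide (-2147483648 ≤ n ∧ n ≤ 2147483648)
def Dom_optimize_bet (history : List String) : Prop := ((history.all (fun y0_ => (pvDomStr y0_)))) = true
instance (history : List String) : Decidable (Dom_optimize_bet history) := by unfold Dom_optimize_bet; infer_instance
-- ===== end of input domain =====

-- B rewrites A's two counting passes as one pass over a single signed balance; objective: simpler.

-- ===== PORT A =====
def optimize_bet (history : List String) : String :=
  if history = [] then "hold"
  else
    let wins : Int := (history.map (fun r => if r = "win" then (1 : Int) else 0)).sum
    let losses : Int := (history.map (fun r => if r = "lose" then (1 : Int) else 0)).sum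
    if wins > losses then "increase"
    else if losses > wins then "decrease"
    else "hold"

-- ===== PORT B =====
def optimize_bet_alt (history : List String) : String :=
  let balance : Int := history.foldl
    (fun b r => if r = "win" then b + 1 else if r = "lose" then b - 1 else b) 0
  if balance > 0 then "increase"
  else if balance < 0 then "decrease"
  else "hold"

-- ===== PRECONDITION & SPEC =====
def Spec_optimize_bet (history : List String) (out : String) : Prop := out = optimize_bet_alt history
instance (history : List String) (out : String) : Decidable (Spec_optimize_bet history out) := by unfold Spec_optimize_bet; infer_instance

-- ===== CLAIM (what is proved, stated in full; the proofs are below) =====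
def Claim_equal_optimize_bet : Prop := ∀ (history : List String), Dom_optimize_bet history → Spec_optimize_bet history (optimize_bet history)

-- ===== LEMMAS AND PROOFS =====

-- B's balance equals A's wins minus losses (accumulator generalized).
theorem pv_balance_eq (l : List String) (b : Int) :
    l.foldl (fun b r => if r = "win" then b + 1 else if r = "lose" then b - 1 else b) b
      = b + (l.map (fun r => if r = "win" then (1 : Int) else 0)).sum
          - (l.map (fun r => if r = "lose" then (1 : Int) else 0)).sum := by
  induction l generalizing b with
  | nil => simp
  | cons x xs ih =>
    simp only [List.foldl_cons, List.map_cons, List.sum_cons, ih]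
    split_ifs <;> simp_all <;> ring

-- ===== VERDICT (by name: the statement is the Claim_ definition above) =====
theorem optimize_bet_spec : Claim_equal_optimize_bet := by
  intro history _
  unfold Spec_optimize_bet optimize_bet optimize_bet_alt
  rw [pv_balance_eq]
  rcases history with _ | ⟨x, xs⟩
  · simp
  · simp only [reduceCtorEq, if_false, zero_add]
    split_ifs <;> first | rfl | omega
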